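-- pv_equiv track=rewrite | github.com/dong99u/codetree-TILs | 240911/알파벳과 사칙연산/calculations-with-alphabet.py | evaluate
-- ===== SOURCE A (Python) =====
-- def evaluate(expression, values):
--     tokens = []
--     for char in expression:
--         if char.isalpha():
--             tokens.append(values[char])
--         else:
--             tokens.append(char)
--
--     result = int(tokens[0])
--     for i in range(1, len(tokens), 2):
--         op, value = tokens[i], int(tokens[i + 1])
--         if op == '+':
--             result += value
--         elif op == '-':
--             result -= value
--         elif op == '*':
--             result *= value
--
--     return result
-- ===== SOURCE B (Python) =====
-- def evaluate(expression, values):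
--     def operand(ch):
--         return int(values[ch]) if ch.isalpha() else int(ch)
--
--     def go(k):
--         # value of expression[:k] (k odd): apply the LAST operator to the
--         # recursively computed value of the shorter prefix
--         if k == 1:
--             return operand(expression[0])
--         left = go(k - 2)
--         op = expression[k - 2]
--         rhs = operand(expression[k - 1])
--         if op == '+':
--             return left + rhs
--         if op == '-':
--             return left - rhs
--         if op == '*':
--             return left * rhs
--         return left
--
--     return go(len(expression))
-- ===== Notes on version B (the rewrite author's own statement) =====
-- stated objective: alternative
-- what changed: B replaces A's tokenize-then-iterate left scan (materialise a token list, then walk range(1, len, 2) with an accumulator) by a back-to-front recursive decomposition: the value of an odd-length prefix is defined by applying its last operator to the recursively computed value of the prefix two shorter, with no token list and no loop.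
import Mathlib
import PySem

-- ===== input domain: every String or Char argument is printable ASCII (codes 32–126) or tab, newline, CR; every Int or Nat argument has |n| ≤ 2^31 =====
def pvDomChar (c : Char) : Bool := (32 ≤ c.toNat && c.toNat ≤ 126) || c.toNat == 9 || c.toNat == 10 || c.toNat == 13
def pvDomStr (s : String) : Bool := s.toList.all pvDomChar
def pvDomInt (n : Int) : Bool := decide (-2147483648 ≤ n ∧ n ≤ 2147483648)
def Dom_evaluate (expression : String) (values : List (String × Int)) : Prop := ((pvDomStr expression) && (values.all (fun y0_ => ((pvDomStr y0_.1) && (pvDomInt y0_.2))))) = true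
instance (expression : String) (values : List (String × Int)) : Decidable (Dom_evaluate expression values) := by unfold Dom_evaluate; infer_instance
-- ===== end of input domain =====

-- B replaces A's tokenize-then-iterate left scan by a back-to-front recursive decomposition:
-- the value of an odd-length prefix is its last operator applied to the value of the prefix
-- two shorter (objective: alternative; no token list, no loop).

-- ===== PORT A =====
-- a token is either a substituted integer (alphabetic char) or the raw character
def pvTokA (values : List (String × Int)) (c : Char) : Int ⊕ Char :=
  if PySem.Chars.isalpha c then Sum.inl ((PySem.Dict.ofList (values.map (fun p => (p.1.toList, p.2)))).getD [c] 0)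
  else Sum.inr c

-- int(token): identity on substituted ints, int(char) on raw chars (default 0 never reached under Pre_)
def pvIntTok (t : Int ⊕ Char) : Int :=
  match t with
  | Sum.inl n => n
  | Sum.inr c => (PySem.Int.ofChars? [c]).getD 0

-- body of A's 'for i in range(1, len(tokens), 2)' loop
def pvStepA (tokens : List (Int ⊕ Char)) (result : Int) (i : Int) : Int :=
  let op := PySem.List.pyGetD tokens i (Sum.inr ' ')
  let value := pvIntTok (PySem.List.pyGetD tokens (i + 1) (Sum.inr ' '))
  if op = Sum.inr '+' then result + value
  else if op = Sum.inr '-' then result - value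
  else if op = Sum.inr '*' then result * value
  else result

def evaluate (expression : String) (values : List (String × Int)) : Int :=
  let tokens := expression.toList.foldl (fun ts c => ts ++ [pvTokA values c]) []
  let result := pvIntTok (PySem.List.pyGetD tokens 0 (Sum.inr ' '))
  (PySem.List.pyRange 1 (PySem.List.len tokens) 2).foldl (pvStepA tokens) result

-- ===== PORT B =====
-- operand(ch) of Source B
def pvOperand (values : List (String × Int)) (c : Char) : Int :=
  if PySem.Chars.isalpha c then (PySem.Dict.ofList (values.map (fun p => (p.1.toList, p.2)))).getD [c] 0
  else (PySem.Int.ofChars? [c]).getD 0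

-- the if/elif chain at the tail of go: apply op to (left, rhs)
def pvApplyB (op : Char) (left rhs : Int) : Int :=
  if op = '+' then left + rhs
  else if op = '-' then left - rhs
  else if op = '*' then left * rhs
  else left

-- go(k) of Source B: value of expression[:k], recursion on k (k even, incl. 0, raises in
-- Python and is outside Pre_; the 0 returned there is never claimed about)
def pvGoR (values : List (String × Int)) (cs : List Char) : Nat → Int
  | 0 => 0
  | 1 => pvOperand values (PySem.List.pyGetD cs 0 ' ')
  | (k+2) =>
      pvApplyB (PySem.List.pyGetD cs (k : Int) ' ') (pvGoR values cs k)
        (pvOperand values (PySem.List.pyGetD cs ((k : Int) + 1) ' '))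

def evaluate_alt (expression : String) (values : List (String × Int)) : Int :=
  pvGoR values expression.toList expression.toList.length

-- ===== PRECONDITION & SPEC =====
-- Pre_ is exactly where the Python A returns: odd length (even length / empty raises IndexError),
-- every alphabetic character is a key of values (else KeyError while tokenizing),
-- every non-alphabetic character at an even position parses as int (else ValueError).
def Pre_evaluate (expression : String) (values : List (String × Int)) : Prop :=
  expression.toList.length % 2 = 1 ∧
  (∀ p ∈ expression.toList.zipIdx, PySem.Chars.isalpha p.1 = true →
      (PySem.Dict.ofList (values.map (fun p => (p.1.toList, p.2)))).contains [p.1] = true) ∧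
  (∀ p ∈ expression.toList.zipIdx, p.2 % 2 = 0 → PySem.Chars.isalpha p.1 = false →
      (PySem.Int.ofChars? [p.1]).isSome = true)
instance (expression : String) (values : List (String × Int)) : Decidable (Pre_evaluate expression values) := by unfold Pre_evaluate; infer_instance

def pvWitness_evaluate : String × (List (String × Int)) := ("a+3", [("a", 5)])

def Spec_evaluate (expression : String) (values : List (String × Int)) (out : Int) : Prop := out = evaluate_alt expression values
instance (expression : String) (values : List (String × Int)) (out : Int) : Decidable (Spec_evaluate expression values out) := by unfold Spec_evaluate; infer_instance

-- ===== CLAIM (what is proved, stated in full; the proofs are below) =====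
def Claim_equal_evaluate : Prop := ∀ (expression : String) (values : List (String × Int)), Dom_evaluate expression values → Pre_evaluate expression values → Spec_evaluate expression values (evaluate expression values)

-- ===== LEMMAS AND PROOFS =====

theorem pvIntTok_tokA (values : List (String × Int)) (c : Char) :
    pvIntTok (pvTokA values c) = pvOperand values c := by
  unfold pvIntTok pvTokA pvOperand
  split_ifs <;> rfl

-- A's tokenizing append-loop is a map
theorem pvTokens_eq (values : List (String × Int)) (cs : List Char) :
    cs.foldl (fun ts c => ts ++ [pvTokA values c]) [] = cs.map (pvTokA values) := by
  simpa using PySem.List.foldl_append_singleton_eq_map (f := pvTokA values) (l := cs) (acc := [])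

-- A's stride-2 loop range as a mapped List.range
theorem pvRange2_map (k : Nat) :
    PySem.List.pyRange 1 (2 * (k : Int) + 1) 2 = (List.range k).map (fun i : Nat => 2 * (i : Int) + 1) := by
  rw [PySem.List.pyRange_of_pos _ _ (by norm_num)]
  have hc : (if (1 : Int) < 2 * (k : Int) + 1 then ((2 * (k : Int) + 1 - 1 + 2 - 1) / 2).toNat else 0) = k := by
    split_ifs <;> omega
  rw [hc]
  exact List.map_congr_left fun i _ => by ring

-- one step of A's loop on the token list, at in-range index m, is pvApplyB on raw chars
theorem pvStepA_eq (values : List (String × Int)) (cs : List Char) (m : Nat)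
    (hm : m + 1 < cs.length) (acc : Int) :
    pvStepA (cs.map (pvTokA values)) acc (m : Int)
      = pvApplyB (cs.getD m ' ') acc (pvOperand values (cs.getD (m + 1) ' ')) := by
  unfold pvStepA
  have hm0 : m < cs.length := by omega
  have h1 : PySem.List.pyGetD (cs.map (pvTokA values)) (m : Int) (Sum.inr ' ')
      = pvTokA values (cs.getD m ' ') := by
    rw [PySem.List.pyGetD_natCast, List.getD_eq_getElem _ _ (by simpa using hm0),
        List.getD_eq_getElem _ _ hm0, List.getElem_map]
  have h2 : PySem.List.pyGetD (cs.map (pvTokA values)) ((m : Int) + 1) (Sum.inr ' ')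
      = pvTokA values (cs.getD (m + 1) ' ') := by
    have hcast : (m : Int) + 1 = ((m + 1 : Nat) : Int) := by push_cast; ring
    rw [hcast, PySem.List.pyGetD_natCast, List.getD_eq_getElem _ _ (by simpa using hm),
        List.getD_eq_getElem _ _ hm, List.getElem_map]
  rw [h1, h2, pvIntTok_tokA]
  set op := cs.getD m ' ' with hop
  unfold pvTokA pvApplyB
  by_cases ha : PySem.Chars.isalpha op = true
  · have hp : op ≠ '+' := by intro h; rw [h] at ha; exact absurd ha (by decide)
    have hmn : op ≠ '-' := by intro h; rw [h] at ha; exact absurd ha (by decide)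
    have hs : op ≠ '*' := by intro h; rw [h] at ha; exact absurd ha (by decide)
    simp [ha, hp, hmn, hs]
  · simp only [ha, if_false, Bool.false_eq_true]
    split_ifs with e1 e2 e3 <;> simp_all

-- A's folded loop over the first 2k+1 tokens equals B's right recursion go(2k+1)
theorem pvMain (values : List (String × Int)) (cs : List Char) (k : Nat)
    (hk : 2 * k + 1 ≤ cs.length) :
    (List.range k).foldl
        (fun acc (i : Nat) => pvStepA (cs.map (pvTokA values)) acc (2 * (i : Int) + 1))
        (pvOperand values (cs.getD 0 ' '))
      = pvGoR values cs (2 * k + 1) := by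
  induction k with
  | zero =>
    have h00 : PySem.List.pyGetD cs (0 : Int) ' ' = cs.getD 0 ' ' := by
      rw [show (0 : Int) = ((0 : Nat) : Int) from rfl, PySem.List.pyGetD_natCast]
    simp [pvGoR, h00]
  | succ k ih =>
    rw [List.range_succ, List.foldl_append, List.foldl_cons, List.foldl_nil,
        ih (by omega)]
    have hidx : (2 * (k : Int) + 1) = ((2 * k + 1 : Nat) : Int) := by push_cast; ring
    rw [hidx, pvStepA_eq values cs (2 * k + 1) (by omega)]
    have hsh : 2 * (k + 1) + 1 = (2 * k + 1) + 2 := by omega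
    rw [hsh]
    show pvApplyB _ _ _ = pvApplyB _ _ _
    have g1 : PySem.List.pyGetD cs ((2 * k + 1 : Nat) : Int) ' ' = cs.getD (2 * k + 1) ' ' :=
      PySem.List.pyGetD_natCast ..
    have g2 : PySem.List.pyGetD cs (((2 * k + 1 : Nat) : Int) + 1) ' ' = cs.getD (2 * k + 1 + 1) ' ' := by
      have hcast : ((2 * k + 1 : Nat) : Int) + 1 = ((2 * k + 1 + 1 : Nat) : Int) := by push_cast; ring
      rw [hcast, PySem.List.pyGetD_natCast]
    rw [g1, g2]

-- ===== VERDICT (by name: the statement is the Claim_ definition above) =====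
theorem evaluate_spec : Claim_equal_evaluate := by
  intro expression values _hdom hpre
  obtain ⟨hodd, -, -⟩ := hpre
  show evaluate expression values = evaluate_alt expression values
  unfold evaluate evaluate_alt
  set cs := expression.toList with hcs
  rw [pvTokens_eq]
  show (PySem.List.pyRange 1 (PySem.List.len (cs.map (pvTokA values))) 2).foldl
      (pvStepA (cs.map (pvTokA values)))
      (pvIntTok (PySem.List.pyGetD (cs.map (pvTokA values)) 0 (Sum.inr ' ')))
    = pvGoR values cs cs.length
  obtain ⟨k, hk⟩ : ∃ k, cs.length = 2 * k + 1 := ⟨cs.length / 2, by omega⟩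
  have hne : cs ≠ [] := by intro h; rw [h] at hk; simp at hk
  have h0 : pvIntTok (PySem.List.pyGetD (cs.map (pvTokA values)) 0 (Sum.inr ' '))
      = pvOperand values (cs.getD 0 ' ') := by
    have h00 : (0 : Int) = ((0 : Nat) : Int) := rfl
    rw [h00, PySem.List.pyGetD_natCast]
    have hlt : 0 < cs.length := by omega
    rw [List.getD_eq_getElem _ _ (by simpa using hlt), List.getD_eq_getElem _ _ hlt,
        List.getElem_map, pvIntTok_tokA]
  have hlen : PySem.List.len (cs.map (pvTokA values)) = 2 * (k : Int) + 1 := by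
    rw [PySem.List.len_eq, List.length_map, hk]; push_cast; ring
  rw [h0, hlen, pvRange2_map, List.foldl_map, pvMain values cs k (by omega), hk]
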